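-- pv_equiv track=rewrite | github.com/fredmbarros/chordSheetTool | chord_tool-batch_and_header.py | split_songs
-- ===== SOURCE A (Python) =====
-- def split_songs(content):
--     """
--     Returns a list of (meta_body_str, chord_body_str) tuples.
--     meta_body_str is the raw text between the --- delimiters (may be empty).
--     chord_body_str is the chord lines that follow.
--     """
--     lines = content.splitlines()
--     delimiters = [i for i, l in enumerate(lines) if l.strip() == '---']
--
--     if not delimiters:
--         return [('', content.strip())]
--
--     songs = []
--     i = 0
--     while i < len(delimiters):
--         meta_open  = delimiters[i]
--         meta_close = delimiters[i + 1] if i + 1 < len(delimiters) else None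
--
--         if meta_close is None:
--             chord_lines = lines[meta_open + 1:]
--             songs.append(('', '\n'.join(chord_lines).strip()))
--             break
--
--         meta_body = '\n'.join(lines[meta_open + 1:meta_close])
--         next_meta_open = delimiters[i + 2] if i + 2 < len(delimiters) else len(lines)
--         chord_body = '\n'.join(lines[meta_close + 1:next_meta_open])
--
--         songs.append((meta_body.strip(), chord_body.strip()))
--         i += 2
--
--     return songs
-- ===== SOURCE B (Python) =====
-- def split_songs(content):
--     """
--     Returns a list of (meta_body_str, chord_body_str) tuples.
--     Single forward pass: a BEFORE/META/CHORD state machine over the lines.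
--     """
--     lines = content.splitlines()
--     if not any(l.strip() == '---' for l in lines):
--         return [('', content.strip())]
--
--     songs = []
--     state = 'BEFORE'
--     meta = []
--     chord = []
--     for line in lines:
--         if line.strip() == '---':
--             if state == 'BEFORE':
--                 state = 'META'
--                 meta = []
--             elif state == 'META':
--                 state = 'CHORD'
--                 chord = []
--             else:  # CHORD: current song is complete, a new one starts
--                 songs.append(('\n'.join(meta).strip(), '\n'.join(chord).strip()))
--                 state = 'META'
--                 meta = []
--         else:
--             if state == 'META':
--                 meta.append(line)
--             elif state == 'CHORD':
--                 chord.append(line)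
--     if state == 'CHORD':
--         songs.append(('\n'.join(meta).strip(), '\n'.join(chord).strip()))
--     else:  # META: unclosed meta block — emitted as a body with empty meta
--         songs.append(('', '\n'.join(meta).strip()))
--     return songs
-- ===== Notes on version B (the rewrite author's own statement) =====
-- stated objective: alternative
-- what changed: Replaced the two-phase delimiter-index collection plus while-loop over index pairs with slicing by a single forward pass over the lines using a BEFORE/META/CHORD state machine with meta/chord buffers.
import Mathlib
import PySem

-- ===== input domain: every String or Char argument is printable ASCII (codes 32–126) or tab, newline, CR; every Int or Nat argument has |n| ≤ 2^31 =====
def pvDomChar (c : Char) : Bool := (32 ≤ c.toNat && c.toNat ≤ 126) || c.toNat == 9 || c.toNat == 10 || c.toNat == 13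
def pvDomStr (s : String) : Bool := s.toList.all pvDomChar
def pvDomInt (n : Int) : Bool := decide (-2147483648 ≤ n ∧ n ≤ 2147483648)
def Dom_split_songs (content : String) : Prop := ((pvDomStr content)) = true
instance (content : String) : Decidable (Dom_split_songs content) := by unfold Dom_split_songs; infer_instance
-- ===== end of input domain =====

-- B replaces A's delimiter-index collection plus while-loop over index pairs with slicing by a
-- single forward pass over the lines (BEFORE/META/CHORD state machine); same value, no speed claim.

-- ===== PORT A =====
-- the while-loop of A: i advances by 2 while i < len(delimiters)
def splitLoopA (lines : List String) (delimiters : List Int) (i : Nat)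
    (songs : List (String × String)) : List (String × String) :=
  if i < delimiters.length then
    let meta_open := delimiters.getD i 0
    let meta_close : Option Int :=
      if i + 1 < delimiters.length then some (delimiters.getD (i + 1) 0) else none
    match meta_close with
    | none =>
        let chord_lines := PySem.List.slice lines (some (meta_open + 1)) none
        songs ++ [("", PySem.Str.strip (PySem.Str.join "\n" chord_lines))]
    | some mc =>
        let meta_body := PySem.Str.join "\n" (PySem.List.slice lines (some (meta_open + 1)) (some mc))
        let next_meta_open : Int :=
          if i + 2 < delimiters.length then delimiters.getD (i + 2) 0 else (lines.length : Int)
        let chord_body := PySem.Str.join "\n" (PySem.List.slice lines (some (mc + 1)) (some next_meta_open))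
        splitLoopA lines delimiters (i + 2)
          (songs ++ [(PySem.Str.strip meta_body, PySem.Str.strip chord_body)])
  else songs
termination_by delimiters.length - i

def split_songs (content : String) : List (String × String) :=
  let lines := PySem.Str.splitlines content
  let delimiters : List Int :=
    (PySem.List.enumerate lines).filterMap
      (fun il => if PySem.Str.strip il.2 == "---" then some il.1 else none)
  if delimiters.isEmpty then [("", PySem.Str.strip content)]
  else splitLoopA lines delimiters 0 []

-- ===== PORT B =====
inductive PState : Type
  | before | pmeta | pchord
deriving DecidableEq, Repr

def splitStepB (st : PState × List String × List String × List (String × String))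
    (line : String) : PState × List String × List String × List (String × String) :=
  let (state, mb, cb, songs) := st
  if PySem.Str.strip line == "---" then
    match state with
    | .before => (.pmeta, [], cb, songs)
    | .pmeta   => (.pchord, mb, [], songs)
    | .pchord  => (.pmeta, [], cb,
        songs ++ [(PySem.Str.strip (PySem.Str.join "\n" mb),
                   PySem.Str.strip (PySem.Str.join "\n" cb))])
  else
    match state with
    | .before => (.before, mb, cb, songs)
    | .pmeta   => (.pmeta, mb ++ [line], cb, songs)
    | .pchord  => (.pchord, mb, cb ++ [line], songs)

def splitFlushB (st : PState × List String × List String × List (String × String)) :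
    List (String × String) :=
  let (state, mb, cb, songs) := st
  match state with
  | .pchord => songs ++ [(PySem.Str.strip (PySem.Str.join "\n" mb),
                         PySem.Str.strip (PySem.Str.join "\n" cb))]
  | _ => songs ++ [("", PySem.Str.strip (PySem.Str.join "\n" mb))]

def split_songs_alt (content : String) : List (String × String) :=
  let lines := PySem.Str.splitlines content
  if lines.any (fun l => PySem.Str.strip l == "---") then
    splitFlushB (lines.foldl splitStepB (PState.before, [], [], []))
  else [("", PySem.Str.strip content)]

-- ===== PRECONDITION & SPEC =====
def Spec_split_songs (content : String) (out : List (String × String)) : Prop := out = split_songs_alt content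
instance (content : String) (out : List (String × String)) : Decidable (Spec_split_songs content out) := by unfold Spec_split_songs; infer_instance

-- ===== CLAIM (what is proved, stated in full; the proofs are below) =====
def Claim_equal_split_songs : Prop := ∀ (content : String), Dom_split_songs content → Spec_split_songs content (split_songs content)

-- ===== LEMMAS AND PROOFS =====

def pDelim (l : String) : Bool := PySem.Str.strip l == "---"

def chunks : List String → List (List String)
  | [] => [[]]
  | l :: ls =>
      if pDelim l then [] :: chunks ls
      else
        match chunks ls with
        | [] => [[l]]
        | c :: cs => (l :: c) :: cs

def pairUp : List (List String) → List (String × String)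
  | [] => []
  | [m] => [("", PySem.Str.strip (PySem.Str.join "\n" m))]
  | m :: c :: rest =>
      (PySem.Str.strip (PySem.Str.join "\n" m), PySem.Str.strip (PySem.Str.join "\n" c)) :: pairUp rest

def dpos : List String → List Nat
  | [] => []
  | l :: ls => if pDelim l then 0 :: (dpos ls).map (· + 1) else (dpos ls).map (· + 1)

def loopN (lines : List String) : List Nat → List (String × String)
  | [] => []
  | [d] => [("", PySem.Str.strip (PySem.Str.join "\n" (lines.drop (d + 1))))]
  | d0 :: d1 :: rest =>
      let nxt := rest.head?.getD lines.length
      (PySem.Str.strip (PySem.Str.join "\n" ((lines.drop (d0 + 1)).take (d1 - (d0 + 1)))),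
       PySem.Str.strip (PySem.Str.join "\n" ((lines.drop (d1 + 1)).take (nxt - (d1 + 1)))))
        :: loopN lines rest


theorem chunks_ne_nil (ls : List String) : chunks ls ≠ [] := by
  induction ls with
  | nil => simp [chunks]
  | cons l ls ih =>
    simp only [chunks]
    split
    · simp
    · cases h : chunks ls with
      | nil => simp
      | cons c cs => simp

theorem chunks_length (ls : List String) : (chunks ls).length = (dpos ls).length + 1 := by
  induction ls with
  | nil => simp [chunks, dpos]
  | cons l ls ih =>
    simp only [chunks, dpos]
    split
    · simp [ih]
    · cases h : chunks ls with
      | nil => exact absurd h (chunks_ne_nil ls)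
      | cons c cs => simp [h] at ih ⊢; omega

theorem dpos_nil_chunks {ls : List String} (h : dpos ls = []) : chunks ls = [ls] := by
  induction ls with
  | nil => simp [chunks]
  | cons l ls ih =>
    simp only [dpos] at h
    by_cases hp : pDelim l
    · simp [hp] at h
    · simp [hp] at h
      simp [chunks, hp, ih h]

theorem take_dpos_head {ls : List String} {d : Nat} {rest : List Nat}
    (h : dpos ls = d :: rest) : ls.take d = (chunks ls).getD 0 [] := by
  induction ls generalizing d rest with
  | nil => simp [dpos] at h
  | cons l ls ih =>
    simp only [dpos] at h
    by_cases hp : pDelim l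
    · simp [hp] at h
      obtain ⟨hd, -⟩ := h
      simp [chunks, hp, ← hd]
    · simp [hp] at h
      cases hd : dpos ls with
      | nil => simp [hd] at h
      | cons d' rest' =>
        rw [hd] at h
        simp at h
        obtain ⟨hd1, -⟩ := h
        have := ih hd
        cases hc : chunks ls with
        | nil => exact absurd hc (chunks_ne_nil ls)
        | cons c cs =>
          simp [hc] at this
          simp [chunks, hp, hc, ← hd1, this]

theorem any_iff_dpos (ls : List String) :
    ls.any (fun l => PySem.Str.strip l == "---") = true ↔ dpos ls ≠ [] := by
  induction ls with
  | nil => simp [dpos]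
  | cons l ls ih =>
    simp only [List.any_cons, dpos]
    by_cases hp : pDelim l
    · have hp' := hp; simp [pDelim] at hp'
      simp [hp, hp']
    · have hp' := hp; simp [pDelim] at hp'
      simp [hp, hp', ih]

theorem slice_dpos_second {ls : List String} {d : Nat} {rest : List Nat}
    (h : dpos ls = d :: rest) :
    (ls.drop (d + 1)).take ((rest.head?.getD ls.length) - (d + 1)) = (chunks ls).getD 1 [] := by
  induction ls generalizing d rest with
  | nil => simp [dpos] at h
  | cons l ls ih =>
    simp only [dpos] at h
    by_cases hp : pDelim l
    · simp [hp] at h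
      obtain ⟨hd, hr⟩ := h
      subst hd
      cases hd2 : dpos ls with
      | nil =>
        rw [hd2] at hr; simp at hr
        subst hr
        simp [chunks, hp, dpos_nil_chunks hd2]
      | cons d1 r1 =>
        rw [hd2] at hr; simp at hr
        subst hr
        have h1 := take_dpos_head hd2
        cases hc : chunks ls with
        | nil => exact absurd hc (chunks_ne_nil ls)
        | cons c cs =>
          simp [hc] at h1
          simp [chunks, hp, hc, h1]
    · simp [hp] at h
      cases hd2 : dpos ls with
      | nil => simp [hd2] at h
      | cons d' rest' =>
        rw [hd2] at h; simp at h
        obtain ⟨hd1, hr⟩ := h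
        subst hd1 hr
        have := ih hd2
        cases hc : chunks ls with
        | nil => exact absurd hc (chunks_ne_nil ls)
        | cons c cs =>
          rw [hc] at this
          have hshift : (rest'.map (· + 1)).head?.getD (l :: ls).length
              = (rest'.head?.getD ls.length) + 1 := by
            cases rest' <;> simp
          simp only [chunks, hp, if_neg hp, hc]
          rw [hshift]
          have harith : rest'.head?.getD ls.length + 1 - (d' + 1 + 1) = rest'.head?.getD ls.length - (d' + 1) := by omega
          simp only [List.drop_succ_cons, harith] at *
          cases cs with
          | nil => simpa using this
          | cons c1 cs1 => simpa using this

theorem loopN_shift (l : String) (ls : List String) (ds : List Nat) :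
    loopN (l :: ls) (ds.map (· + 1)) = loopN ls ds := by
  match ds with
  | [] => simp [loopN]
  | [d] => simp [loopN]
  | d0 :: d1 :: rest =>
    have ih := loopN_shift l ls rest
    simp only [List.map_cons, loopN, ih]
    have hshift : (rest.map (· + 1)).head?.getD (l :: ls).length
        = (rest.head?.getD ls.length) + 1 := by cases rest <;> simp
    rw [hshift]
    have h1 : d1 + 1 - (d0 + 1 + 1) = d1 - (d0 + 1) := by omega
    have h2 : rest.head?.getD ls.length + 1 - (d1 + 1 + 1) = rest.head?.getD ls.length - (d1 + 1) := by omega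
    simp [h1, h2]

theorem loopN_dpos (ls : List String) (k : Nat) :
    loopN ls ((dpos ls).drop k) = pairUp ((chunks ls).drop (k + 1)) := by
  induction ls generalizing k with
  | nil => cases k <;> simp [dpos, chunks, loopN, pairUp]
  | cons l ls ih =>
    by_cases hp : pDelim l
    · simp only [dpos, if_pos hp, chunks]
      cases k with
      | succ k' =>
        simp only [List.drop_succ_cons, ← List.map_drop, loopN_shift]
        simpa using ih k'
      | zero =>
        simp only [List.drop_zero, List.drop_succ_cons, List.drop_zero]
        cases hd : dpos ls with
        | nil =>
          simp only [hd, List.map_nil, loopN]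
          rw [dpos_nil_chunks hd]
          simp [pairUp]
        | cons d1 r =>
          simp only [hd, List.map_cons, loopN]
          have hc2 := chunks_length ls
          rw [hd] at hc2
          cases hc : chunks ls with
          | nil => exact absurd hc (chunks_ne_nil ls)
          | cons c0 cs =>
            cases cs with
            | nil => rw [hc] at hc2; simp at hc2
            | cons c1 cs1 =>
              have h1 := take_dpos_head hd
              have h2 := slice_dpos_second hd
              rw [hc] at h1 h2
              simp at h1 h2
              have hshift : (r.map (· + 1)).head?.getD (l :: ls).length
                  = (r.head?.getD ls.length) + 1 := by cases r <;> simp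
              rw [hshift]
              have ha1 : d1 + 1 - (0 + 1 + 1) = d1 - 1 := by omega
              have ha2 : r.head?.getD ls.length + 1 - (d1 + 1 + 1) = r.head?.getD ls.length - (d1 + 1) := by omega
              -- meta slice: drop (0+1) (l::ls) = ls ; take (d1+1-1) = take d1
              have hm : ((l :: ls).drop (0 + 1)).take (d1 + 1 - (0 + 1)) = ls.take d1 := by simp
              -- chord slice
              have hch : ((l :: ls).drop (d1 + 1 + 1)).take (r.head?.getD ls.length + 1 - (d1 + 1 + 1))
                  = (ls.drop (d1 + 1)).take (r.head?.getD ls.length - (d1 + 1)) := by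
                simp [ha2]
              rw [hm, hch, h1, h2, loopN_shift]
              have hr : r = (dpos ls).drop 1 := by rw [hd]; rfl
              rw [hr, ih 1, hc]
              simp [pairUp]
    · simp only [dpos, if_neg hp, ← List.map_drop, loopN_shift, ih k]
      simp only [chunks, if_neg hp]
      cases hc : chunks ls with
      | nil => exact absurd hc (chunks_ne_nil ls)
      | cons c cs => simp

theorem filterMap_enumerate_dpos (ls : List String) (s : Int) :
    (PySem.List.enumerate ls s).filterMap
      (fun il => if PySem.Str.strip il.2 == "---" then some il.1 else none)
      = (dpos ls).map (fun d : Nat => s + (d : Int)) := by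
  induction ls generalizing s with
  | nil => simp [PySem.List.enumerate_nil, dpos]
  | cons l ls ih =>
    rw [PySem.List.enumerate_cons, List.filterMap_cons, ih]
    simp only [dpos]
    by_cases hp : pDelim l
    · have hp' : (PySem.Str.strip l == "---") = true := hp
      rw [if_pos hp, hp']
      simp only [if_true, List.map_cons, List.map_map]
      congr 1
      · simp
      · apply List.map_congr_left
        intro d _
        simp only [Function.comp_apply]
        push_cast
        ring
    · have hp' : (PySem.Str.strip l == "---") = false := by
        simpa [pDelim] using hp
      rw [if_neg hp, hp']
      simp only [Bool.false_eq_true, if_false, List.map_map]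
      apply List.map_congr_left
      intro d _
      simp only [Function.comp_apply]
      push_cast
      ring

theorem getD_map_cast (ds : List Nat) (i : Nat) :
    (ds.map (fun d : Nat => (d : Int))).getD i 0 = ((ds.getD i 0 : Nat) : Int) := by
  induction ds generalizing i with
  | nil => simp
  | cons d ds ih =>
    cases i with
    | zero => simp
    | succ n => simpa using ih n

theorem splitLoopA_eq_loopN (lines : List String) (ds : List Nat) (i : Nat)
    (songs : List (String × String)) :
    splitLoopA lines (ds.map (fun d : Nat => (d : Int))) i songs = songs ++ loopN lines (ds.drop i) := by
  rw [splitLoopA]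
  by_cases h : i < ds.length
  · rw [if_pos (by simpa using h)]
    simp only [getD_map_cast]
    have hdrop : ds.drop i = ds.getD i 0 :: ds.drop (i + 1) := by
      rw [List.getD_eq_getElem ds 0 h, List.drop_eq_getElem_cons h]
    by_cases h1 : i + 1 < ds.length
    · rw [if_pos (by simpa using h1)]
      have hdrop1 : ds.drop (i + 1) = ds.getD (i + 1) 0 :: ds.drop (i + 2) := by
        rw [List.getD_eq_getElem ds 0 h1, List.drop_eq_getElem_cons h1]
      have hmeta : PySem.List.slice lines (some ((ds.getD i 0 : Int) + 1)) (some (ds.getD (i+1) 0 : Int))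
          = (lines.drop (ds.getD i 0 + 1)).take (ds.getD (i+1) 0 - (ds.getD i 0 + 1)) := by
        have := PySem.List.slice_natCast lines (ds.getD i 0 + 1) (ds.getD (i+1) 0)
        push_cast at this
        rw [this]
      have ih := splitLoopA_eq_loopN lines ds (i + 2)
      by_cases h2 : i + 2 < ds.length
      · rw [if_pos (by simpa using h2)]
        have hnxt : ds[i+2]?.getD lines.length = ds.getD (i + 2) 0 := by
          simp [List.getElem?_eq_getElem h2, List.getD_eq_getElem ds 0 h2, List.getD]
        have hchord : PySem.List.slice lines (some ((ds.getD (i+1) 0 : Int) + 1)) (some (ds.getD (i+2) 0 : Int))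
            = (lines.drop (ds.getD (i+1) 0 + 1)).take (ds.getD (i+2) 0 - (ds.getD (i+1) 0 + 1)) := by
          have := PySem.List.slice_natCast lines (ds.getD (i+1) 0 + 1) (ds.getD (i+2) 0)
          push_cast at this
          rw [this]
        rw [hdrop, hdrop1]
        simp only [loopN, hmeta, hchord, ih]
        simp [List.head?_drop, hnxt]
      · rw [if_neg (by simpa using h2)]
        have hnxt : ds[i+2]?.getD lines.length = lines.length := by
          rw [List.getElem?_eq_none (by omega : ds.length ≤ i + 2)]
          rfl
        have hchord : PySem.List.slice lines (some ((ds.getD (i+1) 0 : Int) + 1)) (some (lines.length : Int))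
            = (lines.drop (ds.getD (i+1) 0 + 1)).take (lines.length - (ds.getD (i+1) 0 + 1)) := by
          have := PySem.List.slice_natCast lines (ds.getD (i+1) 0 + 1) lines.length
          push_cast at this
          rw [this]
        rw [hdrop, hdrop1]
        simp only [loopN, hmeta, hchord, ih]
        simp [List.head?_drop, hnxt]
    · rw [if_neg (by simpa using h1)]
      have hdrop1 : ds.drop (i + 1) = [] := List.drop_eq_nil_of_le (by omega)
      have hslice : PySem.List.slice lines (some ((ds.getD i 0 : Int) + 1)) none
          = lines.drop (ds.getD i 0 + 1) := by
        have := PySem.List.slice_from_natCast lines (ds.getD i 0 + 1)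
        push_cast at this
        rw [this]
      rw [hdrop, hdrop1]
      simp only [loopN, hslice]
  · rw [if_neg (by simpa using h)]
    rw [List.drop_eq_nil_of_le (by omega)]
    simp [loopN]
termination_by ds.length - i
decreasing_by omega

theorem foldB_meta_chord (ls : List String) :
    (∀ mb cb songs,
      splitFlushB (ls.foldl splitStepB (PState.pmeta, mb, cb, songs))
        = songs ++ pairUp ((mb ++ (chunks ls).getD 0 []) :: (chunks ls).tail))
    ∧ (∀ mb cb songs,
      splitFlushB (ls.foldl splitStepB (PState.pchord, mb, cb, songs))
        = songs ++ (PySem.Str.strip (PySem.Str.join "\n" mb),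
            PySem.Str.strip (PySem.Str.join "\n" (cb ++ (chunks ls).getD 0 [])))
          :: pairUp ((chunks ls).tail)) := by
  induction ls with
  | nil =>
    constructor
    · intro mb cb songs
      simp [splitFlushB, chunks, pairUp]
    · intro mb cb songs
      simp [splitFlushB, chunks, pairUp]
  | cons l ls ih =>
    obtain ⟨ihm, ihc⟩ := ih
    by_cases hp : pDelim l
    · have hp' : (PySem.Str.strip l == "---") = true := hp
      constructor
      · intro mb cb songs
        rw [List.foldl_cons]
        simp only [splitStepB, hp', if_true]
        rw [ihc mb []]
        simp only [chunks, if_pos hp]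
        cases hc : chunks ls with
        | nil => exact absurd hc (chunks_ne_nil ls)
        | cons c cs => simp [pairUp]
      · intro mb cb songs
        rw [List.foldl_cons]
        simp only [splitStepB, hp', if_true]
        rw [ihm []]
        simp only [chunks, if_pos hp]
        cases hc : chunks ls with
        | nil => exact absurd hc (chunks_ne_nil ls)
        | cons c cs => simp [pairUp]
    · have hp' : (PySem.Str.strip l == "---") = false := by simpa [pDelim] using hp
      have hcc : ∀ c cs, chunks ls = c :: cs →
          chunks (l :: ls) = (l :: c) :: cs := by
        intro c cs hc
        simp [chunks, hp, hc]
      constructor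
      · intro mb cb songs
        rw [List.foldl_cons]
        simp only [splitStepB, hp', Bool.false_eq_true, if_false]
        rw [ihm (mb ++ [l]) cb songs]
        cases hc : chunks ls with
        | nil => exact absurd hc (chunks_ne_nil ls)
        | cons c cs => simp [hcc c cs hc, hc]
      · intro mb cb songs
        rw [List.foldl_cons]
        simp only [splitStepB, hp', Bool.false_eq_true, if_false]
        rw [ihc mb (cb ++ [l]) songs]
        cases hc : chunks ls with
        | nil => exact absurd hc (chunks_ne_nil ls)
        | cons c cs => simp [hcc c cs hc, hc]

theorem foldB_before (ls : List String) (songs : List (String × String))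
    (h : dpos ls ≠ []) :
    splitFlushB (ls.foldl splitStepB (PState.before, [], [], songs))
      = songs ++ pairUp ((chunks ls).tail) := by
  induction ls with
  | nil => simp [dpos] at h
  | cons l ls ih =>
    by_cases hp : pDelim l
    · have hp' : (PySem.Str.strip l == "---") = true := hp
      rw [List.foldl_cons]
      simp only [splitStepB, hp', if_true]
      rw [(foldB_meta_chord ls).1 [] [] songs]
      simp only [chunks, if_pos hp]
      cases hc : chunks ls with
      | nil => exact absurd hc (chunks_ne_nil ls)
      | cons c cs => simp
    · have hp' : (PySem.Str.strip l == "---") = false := by simpa [pDelim] using hp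
      have h2 : dpos ls ≠ [] := by
        simp only [dpos, if_neg hp] at h
        simpa using h
      rw [List.foldl_cons]
      simp only [splitStepB, hp', Bool.false_eq_true, if_false]
      rw [ih h2]
      simp only [chunks, if_neg hp]
      cases hc : chunks ls with
      | nil => exact absurd hc (chunks_ne_nil ls)
      | cons c cs => simp

theorem split_songs_eq (content : String) : split_songs content = split_songs_alt content := by
  simp only [split_songs, split_songs_alt]
  have hmap : (PySem.List.enumerate (PySem.Str.splitlines content)).filterMap
      (fun il => if PySem.Str.strip il.2 == "---" then some il.1 else none)
      = (dpos (PySem.Str.splitlines content)).map (fun d : Nat => (d : Int)) := by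
    rw [filterMap_enumerate_dpos]
    apply List.map_congr_left
    intro d _
    simp
  rw [hmap]
  by_cases h : dpos (PySem.Str.splitlines content) = []
  · rw [h]
    have hany : ((PySem.Str.splitlines content).any (fun l => PySem.Str.strip l == "---")) = false := by
      have hn : ¬(((PySem.Str.splitlines content).any (fun l => PySem.Str.strip l == "---")) = true) :=
        fun hb => ((any_iff_dpos _).mp hb) h
      simpa using hn
    rw [hany]
    simp
  · have hany : ((PySem.Str.splitlines content).any (fun l => PySem.Str.strip l == "---")) = true :=
      (any_iff_dpos _).mpr h
    rw [hany]
    have hne : ((dpos (PySem.Str.splitlines content)).map (fun d : Nat => (d : Int))).isEmpty = false := by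
      simp [List.isEmpty_iff, h]
    rw [hne]
    simp only [Bool.false_eq_true, if_false, if_true]
    rw [splitLoopA_eq_loopN, List.drop_zero]
    have hln := loopN_dpos (PySem.Str.splitlines content) 0
    rw [List.drop_zero] at hln
    rw [hln, foldB_before _ _ h]
    simp [List.drop_one]


-- ===== VERDICT (by name: the statement is the Claim_ definition above) =====
theorem split_songs_spec : Claim_equal_split_songs := by
  intro content _
  unfold Spec_split_songs
  exact split_songs_eq content
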